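-- pv_equiv track=rewrite | github.com/dkout/6.s080 | week2a/ndoors.py | ndoors
-- ===== SOURCE A (Python) =====
-- def ndoors(n):
--     doors=[False]*n
--     for i in range(1,n+1):
--         for x in range(i, n+1,i):
--             doors[x-1]=not doors[x-1]
--
-- #print (doors)
--     ans=[]
--     for i in range(len(doors)):
--         if doors[i]==True:
--             ans.append(i+1)
--     return(ans)
-- ===== SOURCE B (Python) =====
-- def ndoors(n):
--     ans = []
--     k = 1
--     while k * k <= n:
--         ans.append(k * k)
--         k += 1
--     return ans
-- ===== Notes on version B (the rewrite author's own statement) =====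
-- stated objective: faster
-- what changed: Instead of simulating all n passes of door toggles and scanning the array, B emits the perfect squares k*k <= n directly (the doors left open are exactly the squares, since a door stays open iff its number has an odd number of divisors).
import Mathlib
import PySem

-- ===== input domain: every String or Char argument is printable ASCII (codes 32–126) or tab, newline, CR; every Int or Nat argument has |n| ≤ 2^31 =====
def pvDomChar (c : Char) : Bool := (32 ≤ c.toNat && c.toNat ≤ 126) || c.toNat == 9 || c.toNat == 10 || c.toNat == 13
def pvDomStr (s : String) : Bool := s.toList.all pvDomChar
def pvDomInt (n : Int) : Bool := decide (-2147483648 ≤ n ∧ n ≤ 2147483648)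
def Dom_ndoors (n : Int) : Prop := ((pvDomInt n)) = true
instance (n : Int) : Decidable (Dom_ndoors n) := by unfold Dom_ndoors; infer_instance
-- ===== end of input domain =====

-- B replaces A's O(n log n) toggle simulation by directly emitting the perfect squares k*k ≤ n
-- (the doors left open are exactly the squares); equivalence of return values is proved below.

-- ===== PORT A =====
-- doors[x-1] = not doors[x-1]  (index x-1 is 0 ≤ x-1 < n in every loop iteration, so pySetD/pyGetD are exact)
def pvTog (d : List Bool) (x : Int) : List Bool :=
  PySem.List.pySetD d (x - 1) (! PySem.List.pyGetD d (x - 1) false)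

def ndoors (n : Int) : List Int :=
  -- doors = [False]*n  (empty for n ≤ 0, exactly as Python's list repetition)
  let doors0 : List Bool := List.replicate n.toNat false
  let doors := (PySem.List.pyRange 1 (n + 1) 1).foldl
      (fun d i => (PySem.List.pyRange i (n + 1) i).foldl pvTog d) doors0
  (PySem.List.pyRange 0 (doors.length : Int) 1).foldl
      (fun ans i => if PySem.List.pyGetD doors i false = true then ans ++ [i + 1] else ans) []

-- ===== PORT B =====
-- termination helper for the while-loop: an integer is at most its own square
theorem pvIntLeMulSelf (k : Int) : k ≤ k * k := by
  by_cases h : k ≤ 0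
  · exact h.trans (mul_self_nonneg k)
  · push_neg at h
    nlinarith

def ndoorsAltGo (n k : Int) (ans : List Int) : List Int :=
  if k * k ≤ n then ndoorsAltGo n (k + 1) (ans ++ [k * k]) else ans
termination_by (n + 1 - k).toNat
decreasing_by
  have := pvIntLeMulSelf k
  omega

def ndoors_alt (n : Int) : List Int := ndoorsAltGo n 1 []

-- ===== PRECONDITION & SPEC =====
def Spec_ndoors (n : Int) (out : List Int) : Prop := out = ndoors_alt n
instance (n : Int) (out : List Int) : Decidable (Spec_ndoors n out) := by unfold Spec_ndoors; infer_instance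

-- ===== CLAIM (what is proved, stated in full; the proofs are below) =====
def Claim_equal_ndoors : Prop := ∀ (n : Int), Dom_ndoors n → Spec_ndoors n (ndoors n)

-- ===== LEMMAS AND PROOFS =====

-- the flattened list of all toggles, and the final door array
def pvT (n : Int) : List Int :=
  (PySem.List.pyRange 1 (n + 1) 1).flatMap (fun i => PySem.List.pyRange i (n + 1) i)

def pvDoorsF (n : Int) : List Bool :=
  (pvT n).foldl pvTog (List.replicate n.toNat false)

theorem pvFoldTog_length (T : List Int) (d : List Bool) :
    (T.foldl pvTog d).length = d.length := by
  induction T generalizing d with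
  | nil => rfl
  | cons x T ih =>
      simp only [List.foldl_cons, ih, pvTog]
      simp [PySem.List.length_pySetD]

-- a door is open at the end iff it received an odd number of toggles
theorem pvFoldTog_getD (T : List Int) (d : List Bool) (j : ℕ)
    (hj : j < d.length) (hpos : ∀ x ∈ T, 1 ≤ x ∧ x ≤ (d.length : Int)) :
    (T.foldl pvTog d).getD j false
      = xor (d.getD j false) (decide (T.count ((j : Int) + 1) % 2 = 1)) := by
  induction T generalizing d with
  | nil => simp
  | cons x T ih =>
      obtain ⟨hx1, hx2⟩ := hpos x (List.mem_cons_self)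
      have h0 : (0:Int) ≤ x - 1 := by omega
      have h1 : x - 1 < (d.length : Int) := by omega
      have hset : pvTog d x = d.set (x-1).toNat (! (d.getD (x-1).toNat false)) := by
        rw [pvTog, PySem.List.pySetD_of_nonneg _ _ h0, PySem.List.pyGetD_eq_getElem d false h0 h1,
          List.getD_eq_getElem _ _ (by omega)]
      have hlen : (pvTog d x).length = d.length := by
        rw [hset]; simp
      rw [List.foldl_cons,
        ih (pvTog d x) (by omega) (fun y hy => by
          have := hpos y (List.mem_cons_of_mem _ hy); omega)]
      by_cases hxj : x = (j : Int) + 1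
      · have hm : (x - 1).toNat = j := by omega
        have hcnt : (x :: T).count ((j : Int) + 1) = T.count ((j : Int) + 1) + 1 := by
          simp [hxj]
        have hgd : (pvTog d x).getD j false = ! (d.getD j false) := by
          rw [hset, hm, List.getD_eq_getElem?_getD, List.getElem?_set_self (by omega)]
          rfl
        rw [hgd, hcnt]
        have hpar : ((T.count ((j : Int) + 1) + 1) % 2 = 1) ↔ ¬ (T.count ((j : Int) + 1) % 2 = 1) := by
          omega
        by_cases hc : T.count ((j : Int) + 1) % 2 = 1 <;> simp [hc, hpar]
      · have hm : (x - 1).toNat ≠ j := by omega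
        have hcnt : (x :: T).count ((j : Int) + 1) = T.count ((j : Int) + 1) := by
          simp [hxj]
        have hgd : (pvTog d x).getD j false = d.getD j false := by
          rw [hset, List.getD_eq_getElem?_getD, List.getElem?_set_ne hm,
            List.getD_eq_getElem?_getD]
        rw [hgd, hcnt]

-- the nested toggle loops are one pass over the flattened multiple list
theorem pvNested_eq_flat (n : Int) (d : List Bool) :
    (PySem.List.pyRange 1 (n + 1) 1).foldl
        (fun d i => (PySem.List.pyRange i (n + 1) i).foldl pvTog d) d
      = (pvT n).foldl pvTog d := by
  simp [pvT, List.flatMap_def, List.foldl_flatten, List.foldl_map]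

theorem pvT_bounds (n : Int) : ∀ x ∈ pvT n, 1 ≤ x ∧ x ≤ n := by
  intro x hx
  simp only [pvT, List.mem_flatMap] at hx
  obtain ⟨i, hi, hx⟩ := hx
  have h1 : 1 ≤ i := ((PySem.List.mem_pyRange_one).1 hi).1
  have h2 := (PySem.List.mem_pyRange_iff_of_pos (by omega) x).1 hx
  exact ⟨h1.trans h2.1, by omega⟩

-- one inner range contributes exactly one toggle to door x iff i divides x
theorem pvInnerCount (n i x : Int) (hi : 1 ≤ i) (hx1 : 1 ≤ x) (hxn : x ≤ n) :
    (PySem.List.pyRange i (n + 1) i).count x = if i ∣ x then 1 else 0 := by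
  have hmem : x ∈ PySem.List.pyRange i (n + 1) i ↔ i ∣ x := by
    rw [PySem.List.mem_pyRange_iff_of_pos (by omega)]
    constructor
    · rintro ⟨_, _, hd⟩
      have := dvd_add hd (dvd_refl i)
      simpa using this
    · intro hd
      exact ⟨Int.le_of_dvd (by omega) hd, by omega, dvd_sub hd (dvd_refl i)⟩
  have hnd : (PySem.List.pyRange i (n + 1) i).Nodup := by
    rw [PySem.List.pyRange_of_pos _ _ (by omega : (0:Int) < i)]
    refine List.Nodup.map ?_ (List.nodup_range)
    intro a b hab
    have : i * (a : Int) = i * (b : Int) := by linarith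
    exact_mod_cast mul_left_cancel₀ (by omega : (i:Int) ≠ 0) this
  by_cases hd : i ∣ x
  · have hmem' : x ∈ PySem.List.pyRange i (n + 1) i := hmem.2 hd
    have hub := List.nodup_iff_count_le_one.1 hnd x
    have hlb := List.count_pos_iff.2 hmem'
    simp only [hd, if_true]
    omega
  · simp [hd, List.count_eq_zero_of_not_mem (fun h => hd (hmem.1 h))]

-- a 0/1 indicator sum is a countP
theorem pvSumIndicator (l : List Int) (q : Int → Prop) [DecidablePred q] :
    (l.map (fun i => if q i then (1:ℕ) else 0)).sum = l.countP (fun i => decide (q i)) := by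
  induction l with
  | nil => rfl
  | cons a l ih => by_cases hp : q a <;> simp [hp, ih, Nat.add_comm]

-- total toggle count of door x = number of k < n.toNat with (k+1) ∣ x
theorem pvTotalCount (n : Int) (j : ℕ) (hj : (j : Int) < n) :
    (pvT n).count ((j : Int) + 1)
      = (List.range n.toNat).countP (fun k => decide ((k + 1) ∣ (j + 1))) := by
  have hx1 : (1:Int) ≤ (j : Int) + 1 := by omega
  rw [pvT, List.count, List.countP_flatMap]
  have hmap : ((PySem.List.pyRange 1 (n + 1) 1).map
        ((List.countP (· == (j : Int) + 1)) ∘ (fun i => PySem.List.pyRange i (n + 1) i)))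
      = (PySem.List.pyRange 1 (n + 1) 1).map (fun i => if i ∣ (j : Int) + 1 then 1 else 0) := by
    refine List.map_congr_left ?_
    intro i hi
    have h1 : 1 ≤ i := ((PySem.List.mem_pyRange_one).1 hi).1
    simpa [List.count] using pvInnerCount n i ((j : Int) + 1) h1 hx1 (by omega)
  rw [hmap, pvSumIndicator (PySem.List.pyRange 1 (n + 1) 1) (fun i => i ∣ (j : Int) + 1)]
  rw [PySem.List.pyRange_one, List.countP_map, show (n + 1 - 1 : Int) = n from by ring]
  refine List.countP_congr ?_
  intro k hk
  simp only [Function.comp_apply]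
  have hcast1 : (1 : Int) + (k : Int) = ((k + 1 : ℕ) : Int) := by push_cast; ring
  have hcast2 : ((j : Int) + 1) = ((j + 1 : ℕ) : Int) := by push_cast; ring
  rw [hcast1, hcast2]
  simp only [decide_eq_true_eq]
  exact Int.natCast_dvd_natCast

-- parity of the divisor count: odd iff the number is a perfect square
theorem pvOddDivisors (x m : ℕ) (hx : 1 ≤ x) (hxm : x ≤ m) :
    ((List.range m).countP (fun k => decide ((k + 1) ∣ x)) % 2 = 1)
      ↔ ∃ r : ℕ, (r + 1) * (r + 1) = x := by
  set D : Finset ℕ := (Finset.Icc 1 x).filter (· ∣ x) with hD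
  have hmemD : ∀ d, d ∈ D ↔ 1 ≤ d ∧ d ≤ x ∧ d ∣ x := by
    intro d; simp [hD, Finset.mem_filter, Finset.mem_Icc, and_assoc]
  -- the countP is the cardinality of D
  have hcard : (List.range m).countP (fun k => decide ((k + 1) ∣ x)) = D.card := by
    have h1 : (List.range m).countP (fun k => decide ((k + 1) ∣ x))
        = ((Finset.range m).filter (fun k => (k + 1) ∣ x)).card := by
      rw [← Nat.count_eq_card_filter_range]
      rfl
    rw [h1]
    refine Finset.card_nbij' (fun k => k + 1) (fun d => d - 1) ?_ ?_ ?_ ?_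
    · intro k hk
      simp only [Finset.coe_filter, Set.mem_setOf_eq, Finset.mem_range] at hk
      simp only [Finset.mem_coe]
      rw [hmemD]
      exact ⟨by omega, Nat.le_of_dvd (by omega) hk.2, hk.2⟩
    · intro d hd
      simp only [Finset.mem_coe] at hd
      rw [hmemD] at hd
      simp only [Finset.coe_filter, Set.mem_setOf_eq, Finset.mem_range]
      have hrw : d - 1 + 1 = d := by omega
      rw [hrw]
      exact ⟨by omega, hd.2.2⟩
    · intro k _
      show k + 1 - 1 = k
      omega
    · intro d hd
      simp only [Finset.mem_coe] at hd
      rw [hmemD] at hd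
      show d - 1 + 1 = d
      omega
  rw [hcard]
  -- split D into low / equal / high parts w.r.t. the square root
  have hsplit1 := Finset.card_filter_add_card_filter_not (s := D) (p := fun d => d * d < x)
  have hsplit2 := Finset.card_filter_add_card_filter_not
      (s := D.filter (fun d => ¬ d * d < x)) (p := fun d => d * d = x)
  have he1 : (D.filter (fun d => ¬ d * d < x)).filter (fun d => d * d = x)
      = D.filter (fun d => d * d = x) := by
    ext d; simp only [Finset.mem_filter]; constructor
    · rintro ⟨⟨h1, _⟩, h3⟩; exact ⟨h1, h3⟩
    · rintro ⟨h1, h2⟩; exact ⟨⟨h1, by omega⟩, h2⟩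
  have he2 : (D.filter (fun d => ¬ d * d < x)).filter (fun d => ¬ d * d = x)
      = D.filter (fun d => x < d * d) := by
    ext d; simp only [Finset.mem_filter]; constructor
    · rintro ⟨⟨h1, h2⟩, h3⟩; exact ⟨h1, by omega⟩
    · rintro ⟨h1, h2⟩; exact ⟨⟨h1, by omega⟩, by omega⟩
  rw [he1, he2] at hsplit2
  -- low and high have the same cardinality via d ↦ x / d
  have hbij : (D.filter (fun d => d * d < x)).card = (D.filter (fun d => x < d * d)).card := by
    refine Finset.card_nbij' (fun d => x / d) (fun d => x / d) ?_ ?_ ?_ ?_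
    · intro d hd
      simp only [Finset.mem_coe, Finset.mem_filter] at hd ⊢
      obtain ⟨hdD, hlt⟩ := hd
      rw [hmemD] at hdD
      obtain ⟨hd1, hdx, hdvd⟩ := hdD
      have hmul : d * (x / d) = x := Nat.mul_div_cancel' hdvd
      have hq1 : 1 ≤ x / d := Nat.div_pos hdx (by omega)
      have hdq : d < x / d := by
        by_contra hc
        push_neg at hc
        nlinarith
      constructor
      · rw [hmemD]
        exact ⟨hq1, Nat.div_le_self _ _, Nat.div_dvd_of_dvd hdvd⟩
      · nlinarith
    · intro d hd
      simp only [Finset.mem_coe, Finset.mem_filter] at hd ⊢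
      obtain ⟨hdD, hlt⟩ := hd
      rw [hmemD] at hdD
      obtain ⟨hd1, hdx, hdvd⟩ := hdD
      have hmul : d * (x / d) = x := Nat.mul_div_cancel' hdvd
      have hq1 : 1 ≤ x / d := Nat.div_pos hdx (by omega)
      have hdq : x / d < d := by
        by_contra hc
        push_neg at hc
        nlinarith
      constructor
      · rw [hmemD]
        exact ⟨hq1, Nat.div_le_self _ _, Nat.div_dvd_of_dvd hdvd⟩
      · nlinarith
    · intro d hd
      simp only [Finset.mem_coe, Finset.mem_filter] at hd
      obtain ⟨hdD, _⟩ := hd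
      rw [hmemD] at hdD
      show x / (x / d) = d
      exact Nat.div_div_self hdD.2.2 (by omega)
    · intro d hd
      simp only [Finset.mem_coe, Finset.mem_filter] at hd
      obtain ⟨hdD, _⟩ := hd
      rw [hmemD] at hdD
      show x / (x / d) = d
      exact Nat.div_div_self hdD.2.2 (by omega)
  -- the equal part has one element iff x is a square
  by_cases hsq : ∃ r : ℕ, (r + 1) * (r + 1) = x
  · obtain ⟨r, hr⟩ := hsq
    have heq : D.filter (fun d => d * d = x) = {r + 1} := by
      ext d
      simp only [Finset.mem_filter, Finset.mem_singleton]
      constructor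
      · rintro ⟨_, h2⟩
        have : d * d = (r+1) * (r+1) := by omega
        exact Nat.mul_self_inj.1 this
      · rintro rfl
        refine ⟨?_, hr⟩
        rw [hmemD]
        exact ⟨by omega, Nat.le_of_dvd (by omega) ⟨r + 1, hr.symm⟩, ⟨r + 1, hr.symm⟩⟩
    rw [heq] at hsplit2
    simp only [Finset.card_singleton] at hsplit2
    constructor
    · intro _; exact ⟨r, hr⟩
    · intro _; omega
  · have heq : D.filter (fun d => d * d = x) = ∅ := by
      ext d
      simp only [Finset.mem_filter, Finset.notMem_empty, iff_false, not_and]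
      intro hdD hc
      rw [hmemD] at hdD
      refine hsq ⟨d - 1, ?_⟩
      have hd1 : d - 1 + 1 = d := by omega
      rw [hd1]
      exact hc
    rw [heq] at hsplit2
    simp only [Finset.card_empty] at hsplit2
    constructor
    · intro h; omega
    · intro h; exact absurd h hsq

-- final state of door j (0-based): open iff j+1 is a perfect square
theorem pvDoorsFinal (n : Int) (j : ℕ) (hj : (j : Int) < n) :
    (pvDoorsF n).getD j false = true ↔ ∃ r : ℕ, (r + 1) * (r + 1) = j + 1 := by
  have hn0 : 0 < n := by omega
  have hlen : (List.replicate n.toNat false).length = n.toNat := by simp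
  have hjlen : j < n.toNat := by omega
  rw [pvDoorsF, pvFoldTog_getD _ _ j (by omega)
    (fun x hx => by have := pvT_bounds n x hx; simp; omega)]
  have h0 : (List.replicate n.toNat false).getD j false = false := by
    rw [List.getD_eq_getElem?_getD, List.getElem?_replicate]
    split <;> rfl
  rw [h0, pvTotalCount n j hj]
  simp only [Bool.false_xor, decide_eq_true_eq]
  exact pvOddDivisors (j + 1) n.toNat (by omega) (by omega)

-- A's output is the squares filtered from 1..n
theorem pvA_repr (n : Int) :
    ndoors n = ((PySem.List.pyRange 0 (n.toNat : Int) 1).filter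
        (fun i => PySem.List.pyGetD (pvDoorsF n) i false)).map (fun i => i + 1) := by
  show ((PySem.List.pyRange 0 (_ : Int) 1).foldl _ []) = _
  rw [pvNested_eq_flat, ← pvDoorsF]
  have hlen : (pvDoorsF n).length = n.toNat := by
    rw [pvDoorsF, pvFoldTog_length]; simp
  rw [hlen]
  exact PySem.List.foldl_append_if _ _ _ []

theorem pvA_mem (n y : Int) :
    y ∈ ndoors n ↔ 1 ≤ y ∧ y ≤ n ∧ ∃ r : ℕ, ((r : Int) + 1) * ((r : Int) + 1) = y := by
  rw [pvA_repr]
  simp only [List.mem_map, List.mem_filter, PySem.List.mem_pyRange_one]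
  constructor
  · rintro ⟨i, ⟨⟨hi0, hiN⟩, hp⟩, rfl⟩
    have hn0 : 0 < n := by by_contra h; push_neg at h; simp [Int.toNat_of_nonpos (by omega)] at hiN; omega
    have hlen : (pvDoorsF n).length = n.toNat := by
      rw [pvDoorsF, pvFoldTog_length]; simp
    have hget : PySem.List.pyGetD (pvDoorsF n) i false = (pvDoorsF n).getD i.toNat false := by
      rw [PySem.List.pyGetD_eq_getElem _ false hi0 (by omega),
        List.getD_eq_getElem?_getD, List.getElem?_eq_getElem (by omega)]
      simp
    rw [hget] at hp
    have hsq := (pvDoorsFinal n i.toNat (by omega)).1 hp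
    obtain ⟨r, hr⟩ := hsq
    refine ⟨by omega, by omega, r, ?_⟩
    have : ((r + 1) * (r + 1) : ℕ) = (i.toNat + 1 : ℕ) := hr
    have hcast : (((r + 1) * (r + 1) : ℕ) : Int) = ((i.toNat + 1 : ℕ) : Int) := by exact_mod_cast this
    push_cast at hcast
    omega
  · rintro ⟨hy1, hyn, r, hr⟩
    have hn0 : 0 < n := by omega
    refine ⟨y - 1, ⟨⟨by omega, by omega⟩, ?_⟩, by omega⟩
    have hlen : (pvDoorsF n).length = n.toNat := by
      rw [pvDoorsF, pvFoldTog_length]; simp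
    have hget : PySem.List.pyGetD (pvDoorsF n) (y - 1) false
        = (pvDoorsF n).getD (y - 1).toNat false := by
      rw [PySem.List.pyGetD_eq_getElem _ false (by omega) (by omega),
        List.getD_eq_getElem?_getD, List.getElem?_eq_getElem (by omega)]
      simp
    rw [hget]
    refine (pvDoorsFinal n (y - 1).toNat (by omega)).2 ⟨r, ?_⟩
    have : (((r + 1) * (r + 1) : ℕ) : Int) = (((y - 1).toNat + 1 : ℕ) : Int) := by
      push_cast
      omega
    exact_mod_cast this

theorem pvA_pairwise (n : Int) : (ndoors n).Pairwise (· < ·) := by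
  rw [pvA_repr]
  rw [List.pairwise_map]
  exact ((PySem.List.pairwise_lt_pyRange_one 0 (n.toNat : Int)).filter _).imp (by omega)

-- B's loop produces the squares of k, k+1, …, √n
theorem pvGoChar (n : Int) : ∀ (F : ℕ) (k : Int) (ans : List Int),
    (n + 1 - k).toNat ≤ F → 1 ≤ k →
    ndoorsAltGo n k ans
      = ans ++ (PySem.List.pyRange k ((Nat.sqrt n.toNat : Int) + 1) 1).map (fun j => j * j) := by
  intro F
  induction F with
  | zero =>
      intro k ans hF hk
      have hkn : n < k := by omega
      have hstop : ¬ k * k ≤ n := by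
        intro hc
        have := (pvIntLeMulSelf k).trans hc
        omega
      rw [ndoorsAltGo, if_neg hstop]
      have h1 : Nat.sqrt n.toNat ≤ n.toNat := Nat.sqrt_le_self _
      rw [PySem.List.pyRange_one_eq_nil (by omega)]
      simp
  | succ F ih =>
      intro k ans hF hk
      have hknat : ((k.toNat : ℕ) : Int) = k := Int.toNat_of_nonneg (by omega)
      have hcast : ((k.toNat * k.toNat : ℕ) : Int) = k * k := by push_cast; rw [hknat]
      by_cases hc : k * k ≤ n
      · have hkn : k ≤ n := (pvIntLeMulSelf k).trans hc
        have h1 : k.toNat * k.toNat ≤ n.toNat := by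
          have h' : ((k.toNat * k.toNat : ℕ) : Int) ≤ ((n.toNat : ℕ) : Int) := by
            rw [hcast, Int.toNat_of_nonneg (le_trans (mul_self_nonneg k) hc)]
            exact hc
          exact_mod_cast h'

        have h2 : k.toNat ≤ Nat.sqrt n.toNat := Nat.le_sqrt'.2 (by rw [pow_two]; exact h1)
        have hks : k ≤ (Nat.sqrt n.toNat : Int) := by omega
        rw [ndoorsAltGo, if_pos hc, ih (k + 1) (ans ++ [k * k]) (by omega) (by omega),
          PySem.List.pyRange_one_cons (a := k) (b := (Nat.sqrt n.toNat : Int) + 1) (by omega)]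
        simp
      · have h1 : n.toNat < k.toNat * k.toNat := by
          push_neg at hc
          have h' : ((n.toNat : ℕ) : Int) < ((k.toNat * k.toNat : ℕ) : Int) := by
            rw [hcast]
            have hkk1 : (1:Int) ≤ k * k := le_trans hk (pvIntLeMulSelf k)
            omega
          exact_mod_cast h'

        have h2 : Nat.sqrt n.toNat < k.toNat := Nat.sqrt_lt'.2 (by rw [pow_two]; exact h1)
        rw [ndoorsAltGo, if_neg hc, PySem.List.pyRange_one_eq_nil (by omega)]
        simp

theorem pvB_repr (n : Int) :
    ndoors_alt n
      = (PySem.List.pyRange 1 ((Nat.sqrt n.toNat : Int) + 1) 1).map (fun j => j * j) := by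
  rw [ndoors_alt, pvGoChar n (n + 1 - 1).toNat 1 [] (le_refl _) (le_refl _)]
  simp

theorem pvB_mem (n y : Int) :
    y ∈ ndoors_alt n ↔ 1 ≤ y ∧ y ≤ n ∧ ∃ r : ℕ, ((r : Int) + 1) * ((r : Int) + 1) = y := by
  rw [pvB_repr]
  simp only [List.mem_map, PySem.List.mem_pyRange_one]
  constructor
  · rintro ⟨j, ⟨hj1, hjs⟩, rfl⟩
    have hjs' : j.toNat ≤ Nat.sqrt n.toNat := by omega
    have hn : 0 ≤ n := by
      by_contra h
      push_neg at h
      have h0 : n.toNat = 0 := by omega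
      rw [h0, Nat.sqrt_zero] at hjs
      omega
    have hsq : Nat.sqrt n.toNat * Nat.sqrt n.toNat ≤ n.toNat := by
      have := Nat.sqrt_le' n.toNat
      rwa [pow_two] at this
    have hjj : j.toNat * j.toNat ≤ n.toNat := (Nat.mul_le_mul hjs' hjs').trans hsq
    have hjnat : ((j.toNat : ℕ) : Int) = j := Int.toNat_of_nonneg (by omega)
    have hcast : ((j.toNat * j.toNat : ℕ) : Int) = j * j := by push_cast; rw [hjnat]
    have hone : (1 : Int) * 1 ≤ j * j := mul_le_mul hj1 hj1 (by omega) (by omega)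
    refine ⟨by omega, by omega, ⟨j.toNat - 1, ?_⟩⟩
    have hj : ((j.toNat - 1 : ℕ) : Int) + 1 = j := by omega
    rw [hj]
  · rintro ⟨hy1, hyn, r, hr⟩
    refine ⟨(r : Int) + 1, ⟨by omega, ?_⟩, hr⟩
    have hn0 : 0 < n := by omega
    have hcast : (((r + 1) * (r + 1) : ℕ) : Int) = y := by push_cast; exact hr
    have hle : (r + 1) * (r + 1) ≤ n.toNat := by omega
    have := Nat.le_sqrt'.2 (show (r + 1) ^ 2 ≤ n.toNat by rw [pow_two]; exact hle)
    omega

theorem pvB_pairwise (n : Int) : (ndoors_alt n).Pairwise (· < ·) := by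
  rw [pvB_repr, List.pairwise_map]
  refine (PySem.List.pairwise_lt_pyRange_one 1 _).imp_of_mem ?_
  intro a b ha _ hab
  have h1 : 1 ≤ a := ((PySem.List.mem_pyRange_one).1 ha).1
  nlinarith

-- two strictly increasing integer lists with the same members are equal
theorem pvSortedExt (l₁ l₂ : List Int) (h₁ : l₁.Pairwise (· < ·)) (h₂ : l₂.Pairwise (· < ·))
    (hm : ∀ y, y ∈ l₁ ↔ y ∈ l₂) : l₁ = l₂ := by
  have hn₁ : l₁.Nodup := h₁.imp (fun h => ne_of_lt h)
  have hn₂ : l₂.Nodup := h₂.imp (fun h => ne_of_lt h)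
  have hperm : l₁.Perm l₂ := by
    refine List.perm_of_nodup_nodup_toFinset_eq hn₁ hn₂ ?_
    ext y
    simp [List.mem_toFinset, hm]
  exact hperm.eq_of_pairwise (fun a b _ _ hab hba => by omega) h₁ h₂

-- ===== VERDICT (by name: the statement is the Claim_ definition above) =====
theorem ndoors_spec : Claim_equal_ndoors := by
  intro n _
  unfold Spec_ndoors
  exact (pvSortedExt _ _ (pvA_pairwise n) (pvB_pairwise n)
    (fun y => (pvA_mem n y).trans (pvB_mem n y).symm))
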